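-- pv_equiv track=rewrite | github.com/rauterfrank-ui/Peak_Trade | scripts/ops/report_p7_shadow_repeated_campaign_summary.py | _expected_artifacts_present
-- ===== SOURCE A (Python) =====
-- def _expected_artifacts_present(relpaths: set[str]) -> bool:
--     return (
--         "shadow_session_summary.json" in relpaths
--         and any("manifest" in path.lower() for path in relpaths)
--         and any("evidence" in path.lower() for path in relpaths)
--         and any("account" in path.lower() for path in relpaths)
--         and any("fills" in path.lower() for path in relpaths)
--     )
-- ===== SOURCE B (Python) =====
-- def _expected_artifacts_present(relpaths: set[str]) -> bool:
--     has_manifest = has_evidence = has_account = has_fills = False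
--     for path in relpaths:
--         low = path.lower()
--         if "manifest" in low:
--             has_manifest = True
--         if "evidence" in low:
--             has_evidence = True
--         if "account" in low:
--             has_account = True
--         if "fills" in low:
--             has_fills = True
--     return ("shadow_session_summary.json" in relpaths
--             and has_manifest and has_evidence and has_account and has_fills)
-- ===== Notes on version B (the rewrite author's own statement) =====
-- stated objective: alternative
-- what changed: Replaces four independent any() generator scans over relpaths with a single pass that lowercases each path once and accumulates four boolean flags, keeping the exact case-sensitive membership test for the summary file.
import Mathlib
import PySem

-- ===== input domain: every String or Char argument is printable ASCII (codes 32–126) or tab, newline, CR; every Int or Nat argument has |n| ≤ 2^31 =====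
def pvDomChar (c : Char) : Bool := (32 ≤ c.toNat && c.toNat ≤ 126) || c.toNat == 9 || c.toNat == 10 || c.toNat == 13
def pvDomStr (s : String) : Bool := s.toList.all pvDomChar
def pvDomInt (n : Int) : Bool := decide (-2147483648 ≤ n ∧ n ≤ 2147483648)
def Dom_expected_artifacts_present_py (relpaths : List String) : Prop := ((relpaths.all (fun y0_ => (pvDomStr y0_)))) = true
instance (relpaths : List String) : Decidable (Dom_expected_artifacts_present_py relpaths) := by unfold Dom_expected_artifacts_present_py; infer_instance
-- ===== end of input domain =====

-- B replaces four independent any() scans by a single pass that lowercases each path once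
-- and accumulates four flags; same return value, stated as exact equivalence (alternative decomposition).


-- ===== PORT A =====
def expected_artifacts_present_py (relpaths : List String) : Bool :=
  relpaths.contains "shadow_session_summary.json"
    && relpaths.any (fun path => PySem.Str.isIn "manifest" (PySem.Str.lower path))
    && relpaths.any (fun path => PySem.Str.isIn "evidence" (PySem.Str.lower path))
    && relpaths.any (fun path => PySem.Str.isIn "account" (PySem.Str.lower path))
    && relpaths.any (fun path => PySem.Str.isIn "fills" (PySem.Str.lower path))

-- ===== PORT B =====
def expected_artifacts_present_py_alt_step (fl : Bool × Bool × Bool × Bool) (path : String) :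
    Bool × Bool × Bool × Bool :=
  let low := PySem.Str.lower path
  ((if PySem.Str.isIn "manifest" low then true else fl.1),
   (if PySem.Str.isIn "evidence" low then true else fl.2.1),
   (if PySem.Str.isIn "account" low then true else fl.2.2.1),
   (if PySem.Str.isIn "fills" low then true else fl.2.2.2))

def expected_artifacts_present_py_alt (relpaths : List String) : Bool :=
  let fl := relpaths.foldl expected_artifacts_present_py_alt_step (false, false, false, false)
  relpaths.contains "shadow_session_summary.json"
    && fl.1 && fl.2.1 && fl.2.2.1 && fl.2.2.2

-- ===== PRECONDITION & SPEC =====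
def Spec_expected_artifacts_present_py (relpaths : List String) (out : Bool) : Prop := out = expected_artifacts_present_py_alt relpaths
instance (relpaths : List String) (out : Bool) : Decidable (Spec_expected_artifacts_present_py relpaths out) := by unfold Spec_expected_artifacts_present_py; infer_instance

-- ===== CLAIM (what is proved, stated in full; the proofs are below) =====
def Claim_equal_expected_artifacts_present_py : Prop := ∀ (relpaths : List String), Dom_expected_artifacts_present_py relpaths → Spec_expected_artifacts_present_py relpaths (expected_artifacts_present_py relpaths)

-- ===== LEMMAS AND PROOFS =====
theorem pv_foldl_flags (l : List String) (fl : Bool × Bool × Bool × Bool) :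
    l.foldl expected_artifacts_present_py_alt_step fl =
      (fl.1 || l.any (fun p => PySem.Str.isIn "manifest" (PySem.Str.lower p)),
       fl.2.1 || l.any (fun p => PySem.Str.isIn "evidence" (PySem.Str.lower p)),
       fl.2.2.1 || l.any (fun p => PySem.Str.isIn "account" (PySem.Str.lower p)),
       fl.2.2.2 || l.any (fun p => PySem.Str.isIn "fills" (PySem.Str.lower p))) := by
  induction l generalizing fl with
  | nil => simp
  | cons h t ih =>
    simp only [List.foldl_cons, List.any_cons, ih]
    simp only [expected_artifacts_present_py_alt_step]
    obtain ⟨a, b, c, d⟩ := fl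
    simp only [Prod.mk.injEq]
    refine ⟨?_, ?_, ?_, ?_⟩ <;> (split <;> simp_all [PySem.Str.isIn])

-- ===== VERDICT (by name: the statement is the Claim_ definition above) =====
theorem expected_artifacts_present_py_spec : Claim_equal_expected_artifacts_present_py := by
  intro relpaths _
  unfold Spec_expected_artifacts_present_py
  unfold expected_artifacts_present_py expected_artifacts_present_py_alt
  rw [pv_foldl_flags]
  simp [Bool.and_assoc]
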